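-- pv_equiv track=rewrite | github.com/CloudSecurityClub/s3-file-manager | utils.py | validate_s3_key
-- ===== SOURCE A (Python) =====
-- def validate_s3_key(s3_key: str) -> bool:
--     """Validate S3 key format"""
--     # S3 keys cannot be empty or contain certain characters
--     if not s3_key or s3_key.strip() == '':
--         return False
--
--     # Check for invalid characters
--     invalid_chars = ['\\', '{', '}', '^', '%', '`', '[', ']', '"', '>', '<', '~', '#', '|']
--     for char in invalid_chars:
--         if char in s3_key:
--             return False
--
--     return True
-- ===== SOURCE B (Python) =====
-- INVALID_CHARS = set('\\{}^%`[]"><~#|')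
--
-- def validate_s3_key(s3_key: str) -> bool:
--     """Validate S3 key format"""
--     if not s3_key or s3_key.strip() == '':
--         return False
--     return all(c not in INVALID_CHARS for c in s3_key)
-- ===== Notes on version B (the rewrite author's own statement) =====
-- stated objective: idiomatic
-- what changed: Instead of looping over the fixed invalid-character list and substring-testing each against the key, B makes one pass over the key's characters checking each against a precomputed set of invalid characters.
import Mathlib
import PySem

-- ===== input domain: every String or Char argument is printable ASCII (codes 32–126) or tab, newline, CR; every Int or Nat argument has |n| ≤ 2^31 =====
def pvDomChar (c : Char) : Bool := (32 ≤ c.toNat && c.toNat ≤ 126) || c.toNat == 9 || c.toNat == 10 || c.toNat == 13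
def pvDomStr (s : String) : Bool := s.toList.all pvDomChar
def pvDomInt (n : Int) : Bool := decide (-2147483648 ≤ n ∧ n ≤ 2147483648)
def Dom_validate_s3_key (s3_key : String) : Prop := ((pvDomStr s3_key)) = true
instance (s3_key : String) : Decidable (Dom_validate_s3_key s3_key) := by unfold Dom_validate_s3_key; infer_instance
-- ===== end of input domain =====

-- B replaces A's loop over the fixed invalid-character list (one substring test per entry)
-- with a single pass over the key's characters against a precomputed invalid set (objective: idiomatic).

-- ===== PORT A =====
-- A's literal list 'invalid_chars'
def pvInvalidCharsA : List Char := ['\\', '{', '}', '^', '%', '`', '[', ']', '"', '>', '<', '~', '#', '|']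

-- A's 'for char in invalid_chars: if char in s3_key: return False' loop, with early return
def pvCheckLoopA : List Char → String → Bool
  | [], _ => true
  | c :: rest, s => if PySem.Str.isIn (String.ofList [c]) s then false else pvCheckLoopA rest s

def validate_s3_key (s3_key : String) : Bool :=
  if s3_key.toList.isEmpty || (PySem.Str.strip s3_key).toList.isEmpty then false
  else pvCheckLoopA pvInvalidCharsA s3_key

-- ===== PORT B =====
-- B's INVALID_CHARS = set('\\{}^%`[]"><~#|')
def pvInvalidSetB : PySem.Set Char := PySem.Set.ofList "\\{}^%`[]\"><~#|".toList

-- B: 'all(c not in INVALID_CHARS for c in s3_key)' after the same guard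
def validate_s3_key_alt (s3_key : String) : Bool :=
  if s3_key.toList.isEmpty || (PySem.Str.strip s3_key).toList.isEmpty then false
  else s3_key.toList.all (fun c => !(PySem.Set.contains pvInvalidSetB c))

-- ===== PRECONDITION & SPEC =====
def Spec_validate_s3_key (s3_key : String) (out : Bool) : Prop := out = validate_s3_key_alt s3_key
instance (s3_key : String) (out : Bool) : Decidable (Spec_validate_s3_key s3_key out) := by unfold Spec_validate_s3_key; infer_instance

-- ===== CLAIM (what is proved, stated in full; the proofs are below) =====
def Claim_equal_validate_s3_key : Prop := ∀ (s3_key : String), Dom_validate_s3_key s3_key → Spec_validate_s3_key s3_key (validate_s3_key s3_key)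

-- ===== LEMMAS AND PROOFS =====

-- 'char in s3_key' for a single character is membership of that character
lemma pvIsIn_single_iff (c : Char) (s : String) :
    PySem.Str.isIn (String.ofList [c]) s = true ↔ c ∈ s.toList := by
  rw [PySem.Str.isIn_iff_infix]
  simp [List.singleton_infix_iff]

-- A's early-return loop is the conjunction over the invalid list
lemma pvCheckLoopA_eq_all (cs : List Char) (s : String) :
    pvCheckLoopA cs s = cs.all (fun c => !(PySem.Str.isIn (String.ofList [c]) s)) := by
  induction cs with
  | nil => rfl
  | cons c rest ih =>
    rw [pvCheckLoopA, List.all_cons, ← ih]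
    cases h : PySem.Str.isIn (String.ofList [c]) s <;> simp

-- B's invalid set deduplicates to exactly A's invalid-character list
lemma pvInvalidSetB_eq : pvInvalidSetB = pvInvalidCharsA := by decide

-- swapping the traversal: scanning the invalid list for occurrences in the key
-- equals scanning the key for membership in the invalid set
lemma pvScan_swap (s : String) :
    pvCheckLoopA pvInvalidCharsA s
      = s.toList.all (fun c => !(PySem.Set.contains pvInvalidSetB c)) := by
  rw [pvCheckLoopA_eq_all, Bool.eq_iff_iff]
  simp only [List.all_eq_true, Bool.not_eq_true', pvInvalidSetB_eq, PySem.Set.contains]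
  constructor
  · intro h x hx
    rw [Bool.eq_false_iff]
    intro hc
    have hxmem : x ∈ pvInvalidCharsA := List.contains_iff_mem.mp hc
    have hfalse := h x hxmem
    rw [Bool.eq_false_iff] at hfalse
    exact hfalse ((pvIsIn_single_iff x s).mpr hx)
  · intro h c hc
    rw [Bool.eq_false_iff]
    intro hin
    have hcs : c ∈ s.toList := (pvIsIn_single_iff c s).mp hin
    have hfalse := h c hcs
    rw [Bool.eq_false_iff] at hfalse
    exact hfalse (List.contains_iff_mem.mpr hc)

-- ===== VERDICT (by name: the statement is the Claim_ definition above) =====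
theorem validate_s3_key_spec : Claim_equal_validate_s3_key := by
  intro s _
  unfold Spec_validate_s3_key validate_s3_key validate_s3_key_alt
  cases hg : (s.toList.isEmpty || (PySem.Str.strip s).toList.isEmpty)
  · rw [if_neg (by simp), if_neg (by simp)]
    exact pvScan_swap s
  · rfl
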